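-- pv_equiv track=rewrite | github.com/justcr1si/Different-sorts | template_sort.py | template_sort
-- ===== SOURCE A (Python) =====
-- def template_sort(data, data_template):
--     start_index = 1
--     for element in data_template:
--         for i in range(start_index, len(data)):
--             current = data[i]
--             previous = i - 1
--             if current == element:
--                 while previous >= start_index - 1:
--                     if previous == start_index - 1:
--                         data[previous + 1] = current
--                     else:
--                         data[previous + 1] = data[previous]
--                     previous -= 1
--                 start_index += 1
--
--     for j in range(start_index, len(data)):
--         current = data[j]
--         previous = j - 1
--         while previous >= start_index and data[previous] > current:
--             data[previous + 1] = data[previous]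
--             previous -= 1
--         data[previous + 1] = current
--
--     return data
-- ===== SOURCE B (Python) =====
-- def template_sort(data, data_template):
--     """Reorder the body of data (everything after the leading element, which stays
--     in place) so that values listed in data_template come first, grouped in template
--     order, followed by the remaining values in ascending order; returns data."""
--     rank = {}
--     for position, value in enumerate(data_template):
--         rank.setdefault(value, position)
--     fallback = len(data_template)
--     data[1:] = sorted(sorted(data[1:]), key=lambda x: rank.get(x, fallback))
--     return data
-- ===== Notes on version B (the rewrite author's own statement) =====
-- stated objective: faster
-- what changed: A moves template-matched elements forward by repeated in-place index rotations and then insertion-sorts the tail by index shifting; B builds a first-occurrence rank dict from the template once and sets data[1:] to a value-sort followed by one stable library sort keyed on that rank (unmatched values rank last).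
import Mathlib
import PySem

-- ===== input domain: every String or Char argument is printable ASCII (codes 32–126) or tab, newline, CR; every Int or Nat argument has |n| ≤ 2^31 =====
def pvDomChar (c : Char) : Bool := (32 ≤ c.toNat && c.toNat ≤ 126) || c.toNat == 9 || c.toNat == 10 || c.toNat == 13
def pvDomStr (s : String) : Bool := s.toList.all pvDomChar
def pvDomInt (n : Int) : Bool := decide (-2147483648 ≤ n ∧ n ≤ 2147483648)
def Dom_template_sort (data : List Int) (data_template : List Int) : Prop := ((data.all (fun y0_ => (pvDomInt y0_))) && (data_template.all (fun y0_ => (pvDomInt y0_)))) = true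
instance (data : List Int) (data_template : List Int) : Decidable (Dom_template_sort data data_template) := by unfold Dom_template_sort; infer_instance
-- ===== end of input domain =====

-- B (measured faster) replaces A's in-place index rotations and index insertion sort by a
-- rank dict built once from the template and two stable library sorts of data[1:];
-- A mutates its `data` argument in place and B performs the same mutation
-- (data[1:] = ...), the equivalence proved is about the return value.

-- ===== PORT A =====

-- Python: the inner `while previous >= start_index - 1` loop of the first phase.
-- Reads data[previous] and writes data[previous + 1] (both in range on every
-- reachable state); pyGetD / pySetD are exact there.
def tsShiftRight (current : Int) (startIndex : Int) (previous : Int) (data : List Int) : List Int :=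
  if h : previous ≥ startIndex - 1 then
    tsShiftRight current startIndex (previous - 1)
      (if previous = startIndex - 1 then PySem.List.pySetD data (previous + 1) current
       else PySem.List.pySetD data (previous + 1) (PySem.List.pyGetD data previous 0))
  else data
termination_by (previous - startIndex + 2).toNat
decreasing_by omega

-- Python: one iteration of `for i in range(start_index, len(data))` in the first phase.
def tsPass1Step (element : Int) (st : List Int × Int) (i : Int) : List Int × Int :=
  let data := st.1
  let startIndex := st.2
  let current := PySem.List.pyGetD data i 0
  let previous := i - 1
  if current = element then
    (tsShiftRight current startIndex previous data, startIndex + 1)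
  else
    (data, startIndex)

-- Python: the `while previous >= start_index and data[previous] > current` loop
-- of the second phase; returns (previous, data) as left by the loop.
def tsInsWhile (startIndex : Int) (current : Int) (previous : Int) (data : List Int) : Int × List Int :=
  if h : previous ≥ startIndex ∧ PySem.List.pyGetD data previous 0 > current then
    tsInsWhile startIndex current (previous - 1)
      (PySem.List.pySetD data (previous + 1) (PySem.List.pyGetD data previous 0))
  else (previous, data)
termination_by (previous - startIndex + 1).toNat
decreasing_by omega

-- Python: one iteration of `for j in range(start_index, len(data))` in the second phase.
def tsPass2Step (startIndex : Int) (data : List Int) (j : Int) : List Int :=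
  let current := PySem.List.pyGetD data j 0
  let previous := j - 1
  let r := tsInsWhile startIndex current previous data
  PySem.List.pySetD r.2 (r.1 + 1) current

def template_sort (data : List Int) (data_template : List Int) : List Int :=
  let st := data_template.foldl
    (fun st element =>
      (PySem.List.pyRange st.2 (st.1.length : Int) 1).foldl (tsPass1Step element) st)
    (data, 1)
  (PySem.List.pyRange st.2 (st.1.length : Int) 1).foldl (tsPass2Step st.2) st.1

-- ===== PORT B =====
-- Source B: rank = {} then `rank.setdefault(value, position)` over enumerate(data_template);
-- data[1:] = sorted(sorted(data[1:]), key=lambda x: rank.get(x, fallback)); return data.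
-- The returned value is data[:1] ++ the new body; both library sorts are stable.
def template_sort_alt (data : List Int) (data_template : List Int) : List Int :=
  let rank := (PySem.List.enumerate data_template).foldl
      (fun d p => d.setdefault p.2 p.1) (PySem.Dict.empty : PySem.Dict Int Int)
  let fallback : Int := (data_template.length : Int)
  let body := PySem.List.sorted
      (PySem.List.sorted (PySem.List.slice data (some 1) none) (fun x => x) false)
      (fun x => rank.getD x fallback) false
  PySem.List.slice data none (some 1) ++ body

-- ===== PRECONDITION & SPEC =====
def Spec_template_sort (data : List Int) (data_template : List Int) (out : List Int) : Prop := out = template_sort_alt data data_template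
instance (data : List Int) (data_template : List Int) (out : List Int) : Decidable (Spec_template_sort data data_template out) := by unfold Spec_template_sort; infer_instance

-- ===== CLAIM (what is proved, stated in full; the proofs are below) =====
def Claim_equal_template_sort : Prop := ∀ (data : List Int) (data_template : List Int), Dom_template_sort data data_template → Spec_template_sort data data_template (template_sort data data_template)

-- ===== LEMMAS AND PROOFS =====

-- B's per-template-element step (proof notation only).
def bStep (s : List Int × List Int) (e : Int) : List Int × List Int :=
  (s.1 ++ s.2.filter (fun x => x == e), s.2.filter (fun x => x != e))

-- The value of B's rank lookup: first-occurrence index in the template, or its length.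
def rankK (tpl : List Int) (x : Int) : Int :=
  match PySem.List.index? tpl x with
  | some k => (k : Int)
  | none => (tpl.length : Int)

-- Right-biased insertion of c into seg (what one iteration of A's second phase does).
def insRightRev (c : Int) : List Int → List Int
  | [] => [c]
  | m :: rs => if c < m then m :: insRightRev c rs else c :: m :: rs

def insRight (c : Int) (seg : List Int) : List Int := (insRightRev c seg.reverse).reverse

theorem insRight_nil (c : Int) : insRight c [] = [c] := rfl

theorem insRight_append (c m : Int) (seg : List Int) :
    insRight c (seg ++ [m]) =
      if c < m then insRight c seg ++ [m] else seg ++ [m, c] := by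
  unfold insRight
  rw [List.reverse_append]
  simp only [List.reverse_cons, List.reverse_nil, List.nil_append, List.cons_append,
    insRightRev]
  split_ifs <;> simp

theorem length_insRight (c : Int) (seg : List Int) :
    (insRight c seg).length = seg.length + 1 := by
  induction seg using List.reverseRecOn with
  | nil => rfl
  | append_singleton s m ih =>
      rw [insRight_append]
      split_ifs <;> simp [ih]

theorem insRight_perm (c : Int) (seg : List Int) : (insRight c seg).Perm (c :: seg) := by
  induction seg using List.reverseRecOn with
  | nil => simp [insRight_nil]
  | append_singleton s m ih =>
      rw [insRight_append]
      split_ifs with h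
      · simpa using ih.append_right [m]
      · have : (s ++ [m]) ++ [c] = s ++ [m, c] := by simp
        rw [← this]
        simpa using List.perm_append_comm (l₁ := s ++ [m]) (l₂ := [c])

theorem insRight_sorted (c : Int) (seg : List Int)
    (h : seg.Pairwise (· ≤ ·)) : (insRight c seg).Pairwise (· ≤ ·) := by
  induction seg using List.reverseRecOn with
  | nil => simp [insRight_nil]
  | append_singleton s m ih =>
      rw [List.pairwise_append] at h
      rw [insRight_append]
      split_ifs with hcm
      · rw [List.pairwise_append]
        refine ⟨ih h.1, by simp, ?_⟩
        intro a ha b hb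
        rw [List.mem_singleton] at hb
        subst hb
        rcases List.mem_cons.mp ((insRight_perm c s).mem_iff.mp ha) with h1 | h1
        · subst h1; exact le_of_lt hcm
        · exact h.2.2 a h1 b (by simp)
      · rw [List.pairwise_append]
        refine ⟨h.1, by simp [not_lt.mp hcm], ?_⟩
        intro a ha b hb
        have ham : a ≤ m := h.2.2 a ha m (by simp)
        rcases List.mem_cons.mp hb with hb | hb
        · subst hb; exact ham
        · rw [List.mem_singleton] at hb; subst hb
          exact le_trans ham (not_lt.mp hcm)

-- set / getD through a prefix of known length (corollaries of List.set_append / getD_append_right)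
theorem set_append_len (pre l : List Int) (k : Nat) (v : Int) :
    (pre ++ l).set (pre.length + k) v = pre ++ l.set k v := by
  rw [List.set_append, if_neg (by omega)]
  simp

theorem getD_append_len (pre l : List Int) (k : Nat) (d : Int) :
    (pre ++ l).getD (pre.length + k) d = l.getD k d := by
  rw [List.getD_append_right _ _ _ _ (by omega)]
  simp

-- The first-phase while loop rotates data[s..i] one step right and writes `c` at s.
theorem tsShiftRight_spec (c : Int) :
    ∀ (mid : List Int) (pre : List Int) (r : Int) (suf : List Int),
      tsShiftRight c (pre.length : Int) ((pre.length : Int) + (mid.length : Int) - 1)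
        (pre ++ mid ++ r :: suf) = pre ++ c :: (mid ++ suf) := by
  intro mid
  induction mid using List.reverseRecOn with
  | nil =>
      intro pre r suf
      simp only [List.length_nil, Nat.cast_zero, add_zero, List.nil_append, List.append_nil]
      rw [tsShiftRight, dif_pos (le_refl _), if_pos rfl, tsShiftRight, dif_neg (by omega)]
      rw [PySem.List.pySetD_of_nonneg _ _ (by omega)]
      have h1 : ((pre.length : Int) - 1 + 1).toNat = pre.length + 0 := by omega
      rw [h1, set_append_len]
      simp
  | append_singleton s m ih =>
      intro pre r suf
      rw [tsShiftRight, dif_pos (by simp; omega), if_neg (by simp; omega)]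
      have hidx : (pre.length : Int) + ((s ++ [m]).length : Int) - 1 = ((pre ++ s).length : Int) := by
        simp; omega
      rw [hidx]
      have hdata : pre ++ (s ++ [m]) ++ r :: suf = (pre ++ s) ++ m :: r :: suf := by simp
      rw [hdata]
      rw [PySem.List.pyGetD_natCast, PySem.List.pySetD_of_nonneg _ _ (by omega)]
      have h2 : (((pre ++ s).length : Int) + 1).toNat = (pre ++ s).length + 1 := by omega
      rw [h2, set_append_len]
      have h3 : ((pre ++ s) ++ m :: r :: suf).getD (pre ++ s).length 0 = m := by
        have := getD_append_len (pre ++ s) (m :: r :: suf) 0 0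
        simpa using this
      rw [h3]
      show tsShiftRight c (pre.length : Int) (((pre ++ s).length : Int) - 1)
        ((pre ++ s) ++ m :: m :: suf) = _
      have h4 : ((pre ++ s).length : Int) - 1 = (pre.length : Int) + (s.length : Int) - 1 := by
        simp
      have h5 : (pre ++ s) ++ m :: m :: suf = pre ++ s ++ m :: m :: suf := by simp
      rw [h4, h5, ih pre m (m :: suf)]
      simp

-- The first-phase scan over indices [|pre|+|kept| , |pre|+|kept|+|rest|) moves every
-- occurrence of e in rest to position |pre| (in order) and keeps the others in order.
theorem tsPass1_fold (e : Int) :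
    ∀ (rest pre kept : List Int),
      (PySem.List.pyRange ((pre.length + kept.length : Nat) : Int)
          ((pre.length + kept.length + rest.length : Nat) : Int) 1).foldl
        (tsPass1Step e) (pre ++ kept ++ rest, (pre.length : Int))
      = (pre ++ rest.filter (fun x => x == e) ++ (kept ++ rest.filter (fun x => x != e)),
         (pre.length : Int) + ((rest.filter (fun x => x == e)).length : Int)) := by
  intro rest
  induction rest with
  | nil =>
      intro pre kept
      rw [PySem.List.pyRange_one_eq_nil (by simp)]
      simp
  | cons r rest' ih =>
      intro pre kept
      rw [PySem.List.pyRange_one_cons (by push_cast [List.length_cons]; omega)]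
      rw [List.foldl_cons]
      have hget : PySem.List.pyGetD (pre ++ kept ++ r :: rest')
          ((pre.length + kept.length : Nat) : Int) 0 = r := by
        rw [PySem.List.pyGetD_natCast]
        have hassoc : pre ++ kept ++ r :: rest' = (pre ++ kept) ++ r :: rest' := by simp
        rw [hassoc]
        have := getD_append_len (pre ++ kept) (r :: rest') 0 0
        simpa using this
      by_cases hre : r = e
      · subst hre
        have hstep : tsPass1Step r (pre ++ kept ++ r :: rest', (pre.length : Int))
              ((pre.length + kept.length : Nat) : Int)
            = ((pre ++ [r]) ++ kept ++ rest', (((pre ++ [r]).length : Nat) : Int)) := by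
          simp only [tsPass1Step, hget]
          have hprev : ((pre.length + kept.length : Nat) : Int) - 1
              = (pre.length : Int) + (kept.length : Int) - 1 := by push_cast; ring
          rw [hprev, tsShiftRight_spec r kept pre r rest']
          simp
        rw [hstep]
        have hb1 : ((pre.length + kept.length : Nat) : Int) + 1
            = (((pre ++ [r]).length + kept.length : Nat) : Int) := by simp; omega
        have hb2 : ((pre.length + kept.length + (r :: rest').length : Nat) : Int)
            = (((pre ++ [r]).length + kept.length + rest'.length : Nat) : Int) := by
          simp; push_cast; ring
        rw [hb1, hb2, ih (pre ++ [r]) kept]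
        simp
        omega
      · have hstep : tsPass1Step e (pre ++ kept ++ r :: rest', (pre.length : Int))
              ((pre.length + kept.length : Nat) : Int)
            = (pre ++ (kept ++ [r]) ++ rest', (pre.length : Int)) := by
          simp only [tsPass1Step, hget, if_neg hre]
          simp
        rw [hstep]
        have hb1 : ((pre.length + kept.length : Nat) : Int) + 1
            = ((pre.length + (kept ++ [r]).length : Nat) : Int) := by simp; push_cast; ring
        have hb2 : ((pre.length + kept.length + (r :: rest').length : Nat) : Int)
            = ((pre.length + (kept ++ [r]).length + rest'.length : Nat) : Int) := by
          simp; push_cast; ring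
        rw [hb1, hb2, ih pre (kept ++ [r])]
        simp [hre]

-- Folding A's first phase over the whole template from state (o ++ t, |o|)
-- computes exactly the abstract bStep fold.
theorem tsPhase1 :
    ∀ (tmpl : List Int) (o t : List Int),
      tmpl.foldl
        (fun st element =>
          (PySem.List.pyRange st.2 (st.1.length : Int) 1).foldl (tsPass1Step element) st)
        (o ++ t, (o.length : Int))
      = ((tmpl.foldl bStep (o, t)).1 ++ (tmpl.foldl bStep (o, t)).2,
         (((tmpl.foldl bStep (o, t)).1.length : Nat) : Int)) := by
  intro tmpl
  induction tmpl with
  | nil => intro o t; simp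
  | cons hd tl ih =>
      intro o t
      simp only [List.foldl_cons]
      have hpass := tsPass1_fold hd t o []
      simp only [List.length_nil, Nat.add_zero, List.append_nil, List.nil_append] at hpass
      have hlen : (((o ++ t, (o.length : Int)).1.length : Nat) : Int)
          = ((o.length + t.length : Nat) : Int) := by simp
      rw [hlen, hpass]
      have hcast : (o.length : Int) + ((t.filter (fun x => x == hd)).length : Int)
          = (((o ++ t.filter (fun x => x == hd)).length : Nat) : Int) := by simp
      rw [hcast, ih (o ++ t.filter (fun x => x == hd)) (t.filter (fun x => x != hd))]
      rfl

-- The second-phase while loop followed by its final write inserts c right-biased.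
theorem tsInsWhile_set (c : Int) :
    ∀ (seg front : List Int) (x : Int) (rest : List Int),
      PySem.List.pySetD
          (tsInsWhile (front.length : Int) c ((front.length : Int) + (seg.length : Int) - 1)
            (front ++ seg ++ x :: rest)).2
          ((tsInsWhile (front.length : Int) c ((front.length : Int) + (seg.length : Int) - 1)
            (front ++ seg ++ x :: rest)).1 + 1) c
        = front ++ insRight c seg ++ rest := by
  intro seg
  induction seg using List.reverseRecOn with
  | nil =>
      intro front x rest
      simp only [List.length_nil, Nat.cast_zero, add_zero, List.nil_append, List.append_nil]
      rw [tsInsWhile, dif_neg (by rintro ⟨h1, -⟩; omega)]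
      rw [PySem.List.pySetD_of_nonneg _ _ (by omega)]
      have h1 : ((front.length : Int) - 1 + 1).toNat = front.length + 0 := by omega
      rw [h1, set_append_len]
      simp [insRight_nil]
  | append_singleton s m ih =>
      intro front x rest
      have hidx : (front.length : Int) + ((s ++ [m]).length : Int) - 1
          = (((front ++ s).length : Nat) : Int) := by simp; omega
      have hdata : front ++ (s ++ [m]) ++ x :: rest = front ++ s ++ m :: x :: rest := by simp
      rw [hidx, hdata]
      have hget : PySem.List.pyGetD (front ++ s ++ m :: x :: rest)
          (((front ++ s).length : Nat) : Int) 0 = m := by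
        rw [PySem.List.pyGetD_natCast]
        have := getD_append_len (front ++ s) (m :: x :: rest) 0 0
        simpa using this
      by_cases hcm : c < m
      · have hset : PySem.List.pySetD (front ++ s ++ m :: x :: rest)
            (((front ++ s).length : Int) + 1) m = front ++ s ++ m :: m :: rest := by
          rw [PySem.List.pySetD_of_nonneg _ _ (by omega)]
          have h2 : (((front ++ s).length : Int) + 1).toNat = (front ++ s).length + 1 := by
            omega
          rw [h2, set_append_len]
          simp
        rw [tsInsWhile, dif_pos ⟨by simp, by rw [hget]; exact hcm⟩, hget, hset]
        have h3 : (((front ++ s).length : Int)) - 1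
            = (front.length : Int) + (s.length : Int) - 1 := by simp
        rw [h3, ih front m (m :: rest), insRight_append, if_pos hcm]
        simp
      · rw [tsInsWhile, dif_neg (by rintro ⟨-, hgt⟩; rw [hget] at hgt; omega)]
        rw [PySem.List.pySetD_of_nonneg _ _ (by omega)]
        have h2 : (((front ++ s).length : Int) + 1).toNat = (front ++ s).length + 1 := by omega
        rw [h2, set_append_len, insRight_append, if_neg hcm]
        simp

-- One iteration of the second phase inserts the current element into the sorted block.
theorem tsPass2_step (front seg : List Int) (r : Int) (rest : List Int) :
    tsPass2Step (front.length : Int) (front ++ seg ++ r :: rest)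
        ((front.length + seg.length : Nat) : Int)
      = front ++ insRight r seg ++ rest := by
  have hget : PySem.List.pyGetD (front ++ seg ++ r :: rest)
      ((front.length + seg.length : Nat) : Int) 0 = r := by
    rw [PySem.List.pyGetD_natCast]
    have hassoc : front ++ seg ++ r :: rest = (front ++ seg) ++ r :: rest := by simp
    rw [hassoc]
    have := getD_append_len (front ++ seg) (r :: rest) 0 0
    simpa using this
  simp only [tsPass2Step, hget]
  have hprev : ((front.length + seg.length : Nat) : Int) - 1
      = (front.length : Int) + (seg.length : Int) - 1 := by push_cast; ring
  rw [hprev]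
  exact tsInsWhile_set r seg front r rest

-- The whole second phase: an insertion sort of everything right of `front`.
theorem tsPhase2 :
    ∀ (rest front seg : List Int),
      (PySem.List.pyRange ((front.length + seg.length : Nat) : Int)
          ((front.length + seg.length + rest.length : Nat) : Int) 1).foldl
        (tsPass2Step (front.length : Int)) (front ++ seg ++ rest)
      = front ++ rest.foldl (fun acc x => insRight x acc) seg := by
  intro rest
  induction rest with
  | nil =>
      intro front seg
      rw [PySem.List.pyRange_one_eq_nil (by simp)]
      simp
  | cons r rest' ih =>
      intro front seg
      rw [PySem.List.pyRange_one_cons (by push_cast [List.length_cons]; omega)]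
      rw [List.foldl_cons, tsPass2_step front seg r rest']
      have hb1 : ((front.length + seg.length : Nat) : Int) + 1
          = ((front.length + (insRight r seg).length : Nat) : Int) := by
        rw [length_insRight]; push_cast; ring
      have hb2 : ((front.length + seg.length + (r :: rest').length : Nat) : Int)
          = ((front.length + (insRight r seg).length + rest'.length : Nat) : Int) := by
        rw [length_insRight]; push_cast [List.length_cons]; ring
      rw [hb1, hb2, ih front (insRight r seg)]
      rfl

theorem insFold_perm (t : List Int) :
    ∀ seg, (t.foldl (fun acc x => insRight x acc) seg).Perm (seg ++ t) := by
  induction t with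
  | nil => intro seg; simp
  | cons x t' ih =>
      intro seg
      rw [List.foldl_cons]
      refine (ih (insRight x seg)).trans ?_
      refine (((insRight_perm x seg).append_right t').trans ?_)
      exact List.perm_middle.symm

theorem insFold_sorted (t : List Int) :
    ∀ seg, seg.Pairwise (· ≤ ·) → (t.foldl (fun acc x => insRight x acc) seg).Pairwise (· ≤ ·) := by
  induction t with
  | nil => intro seg h; simpa using h
  | cons x t' ih =>
      intro seg h
      rw [List.foldl_cons]
      exact ih (insRight x seg) (insRight_sorted x seg h)

theorem insFold_eq_sorted (t : List Int) :
    t.foldl (fun acc x => insRight x acc) [] = PySem.List.sorted t (fun x => x) false := by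
  exact (PySem.List.sorted_id_eq_of_perm_of_pairwise t
    (t.foldl (fun acc x => insRight x acc) [])
    (by simpa using insFold_perm t []) (insFold_sorted t [] (by simp))).symm

theorem foldl_pass1_nil (l : List Int) :
    l.foldl
      (fun st element =>
        (PySem.List.pyRange st.2 (st.1.length : Int) 1).foldl (tsPass1Step element) st)
      (([] : List Int), (1 : Int)) = ([], 1) := by
  induction l with
  | nil => rfl
  | cons a l ih =>
      rw [List.foldl_cons]
      rw [show (PySem.List.pyRange (([] : List Int), (1 : Int)).2
          ((([] : List Int), (1 : Int)).1.length : Int) 1) = [] from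
        PySem.List.pyRange_one_eq_nil (by simp)]
      exact ih

-- B's abstract fold: the second component is the iterated filter.
theorem snd_foldl_bStep (tmpl : List Int) :
    ∀ (o t : List Int),
      (tmpl.foldl bStep (o, t)).2
        = tmpl.foldl (fun t e => t.filter (fun x => x != e)) t := by
  induction tmpl with
  | nil => intro o t; rfl
  | cons hd tl ih =>
      intro o t
      simp only [List.foldl_cons]
      exact ih _ _

-- Iterating `filter (!= e)` over the template removes exactly the template's values.
theorem foldl_filter_ne (tmpl : List Int) :
    ∀ (t : List Int),
      tmpl.foldl (fun t e => t.filter (fun x => x != e)) t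
        = t.filter (fun x => !(tmpl.contains x)) := by
  induction tmpl with
  | nil => intro t; simp
  | cons hd tl ih =>
      intro t
      simp only [List.foldl_cons]
      rw [ih, List.filter_filter]
      refine List.filter_congr ?_
      intro x _
      by_cases hxe : x = hd <;>
        by_cases hcx : tl.contains x = true <;>
          simp [List.contains_cons, hxe, hcx]

-- The bStep fold appends to its first component.
theorem fst_foldl_bStep_append (tmpl : List Int) :
    ∀ (o p : List Int),
      (tmpl.foldl bStep (o, p)).1 = o ++ (tmpl.foldl bStep ([], p)).1 := by
  induction tmpl with
  | nil => intro o p; simp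
  | cons e tl ih =>
      intro o p
      simp only [List.foldl_cons, bStep]
      rw [ih (o ++ p.filter (fun x => x == e)), ih (([] : List Int) ++ p.filter (fun x => x == e))]
      simp

-- Members of the emitted part come from p and from the template.
theorem mem_fst_foldl_bStep (tmpl : List Int) :
    ∀ (p : List Int) (y : Int), y ∈ (tmpl.foldl bStep ([], p)).1 → y ∈ p ∧ y ∈ tmpl := by
  induction tmpl with
  | nil => intro p y hy; simp at hy
  | cons e tl ih =>
      intro p y hy
      simp only [List.foldl_cons, bStep] at hy
      rw [fst_foldl_bStep_append] at hy
      rcases List.mem_append.mp hy with hy | hy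
      · simp only [List.nil_append] at hy
        have hye : y = e := by simpa using (List.of_mem_filter hy)
        exact ⟨List.mem_of_mem_filter hy, by simp [hye]⟩
      · obtain ⟨h1, h2⟩ := ih _ y hy
        exact ⟨List.mem_of_mem_filter h1, by simp [h2]⟩

-- Folding bStep over an empty pool emits nothing.
theorem fst_foldl_bStep_nil (tmpl : List Int) :
    ∀ (o : List Int), (tmpl.foldl bStep (o, [])).1 = o := by
  induction tmpl with
  | nil => intro o; rfl
  | cons e tl ih => intro o; simpa [bStep] using ih o

-- The emitted part only depends on the pool up to permutation.
theorem fst_foldl_bStep_perm (tmpl : List Int) :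
    ∀ (o s t : List Int), s.Perm t →
      (tmpl.foldl bStep (o, s)).1 = (tmpl.foldl bStep (o, t)).1 := by
  induction tmpl with
  | nil => intro o s t h; rfl
  | cons e tl ih =>
      intro o s t h
      simp only [List.foldl_cons, bStep]
      have hfe : s.filter (fun x => x == e) = t.filter (fun x => x == e) := by
        rw [List.filter_beq, List.filter_beq, h.count_eq]
      rw [hfe]
      exact ih _ _ _ (h.filter _)

-- rankK facts
theorem rankK_nonneg (tpl : List Int) (x : Int) : 0 ≤ rankK tpl x := by
  unfold rankK
  cases PySem.List.index? tpl x <;> simp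

theorem rankK_le (tpl : List Int) (x : Int) : rankK tpl x ≤ (tpl.length : Int) := by
  unfold rankK
  cases h : PySem.List.index? tpl x with
  | none => simp
  | some k =>
      obtain ⟨hk, -, -⟩ := PySem.List.getElem_of_index?_eq_some h
      simp
      omega

theorem rankK_of_not_mem (tpl : List Int) (x : Int) (h : x ∉ tpl) :
    rankK tpl x = (tpl.length : Int) := by
  unfold rankK
  rw [(PySem.List.index?_eq_none_iff tpl x).mpr h]

theorem rankK_lt_of_mem (tpl : List Int) (x : Int) (h : x ∈ tpl) :
    rankK tpl x < (tpl.length : Int) := by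
  unfold rankK
  cases hq : PySem.List.index? tpl x with
  | none => exact absurd ((PySem.List.index?_eq_none_iff tpl x).mp hq) (by simpa using h)
  | some k =>
      obtain ⟨hk, -, -⟩ := PySem.List.getElem_of_index?_eq_some hq
      simp
      omega

theorem rankK_cons_self (e : Int) (rest : List Int) : rankK (e :: rest) e = 0 := by
  unfold rankK
  rw [PySem.List.index?_cons_self]
  simp

theorem rankK_cons_of_ne_mem (e z : Int) (rest : List Int) (hne : e ≠ z) (hz : z ∈ rest) :
    rankK (e :: rest) z = rankK rest z + 1 := by
  unfold rankK
  rw [PySem.List.index?_cons_of_ne rest hne]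
  cases hq : PySem.List.index? rest z with
  | none => exact absurd ((PySem.List.index?_eq_none_iff rest z).mp hq) (by simpa using hz)
  | some k => simp

-- insertBy structural lemmas
theorem insertBy_cons (before : Int → Int → Bool) (x y : Int) (ys : List Int) :
    PySem.List.insertBy before x (y :: ys)
      = if before x y then x :: y :: ys else y :: PySem.List.insertBy before x ys := rfl

theorem insertBy_append_not (before : Int → Int → Bool) (x : Int) (l1 l2 : List Int)
    (h : ∀ y ∈ l1, before x y = false) :
    PySem.List.insertBy before x (l1 ++ l2) = l1 ++ PySem.List.insertBy before x l2 := by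
  induction l1 with
  | nil => simp
  | cons y l1' ih =>
      rw [List.cons_append, insertBy_cons, if_neg (by simp [h y (by simp)])]
      rw [ih (fun z hz => h z (by simp [hz])), List.cons_append]

theorem insertBy_all_before (before : Int → Int → Bool) (x : Int) (l2 : List Int)
    (h : ∀ y ∈ l2, before x y = true) :
    PySem.List.insertBy before x l2 = x :: l2 := by
  cases l2 with
  | nil => rfl
  | cons y ys => rw [insertBy_cons, if_pos (h y (by simp))]

-- B's rank dict: get? after the setdefault loop is the first-occurrence index.
theorem setdefault_fold_get? (tpl : List Int) :
    ∀ (s : Int) (d : PySem.Dict Int Int) (x : Int),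
      ((PySem.List.enumerate tpl s).foldl (fun d p => d.setdefault p.2 p.1) d).get? x
        = ((d.get? x).or ((PySem.List.index? tpl x).map (fun k => s + (k : Int)))) := by
  induction tpl with
  | nil =>
      intro s d x
      simp [PySem.List.enumerate_nil]
  | cons v rest ih =>
      intro s d x
      rw [PySem.List.enumerate_cons, List.foldl_cons, ih (s + 1) (d.setdefault v s) x]
      by_cases hxv : x = v
      · subst hxv
        rw [PySem.Dict.get?_setdefault_self, PySem.List.index?_cons_self]
        cases hd : d.get? x with
        | none => simp
        | some a => simp
      · rw [PySem.Dict.get?_setdefault_of_ne _ _ hxv,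
          PySem.List.index?_cons_of_ne rest (fun h => hxv h.symm)]
        cases hq : PySem.List.index? rest x with
        | none => simp
        | some k =>
            simp only [Option.map_some, Option.map_map]
            have : s + 1 + (k : Int) = s + ((k : Int) + 1) := by ring
            simp [this]

theorem rank_getD (tpl : List Int) (x : Int) :
    ((PySem.List.enumerate tpl).foldl (fun d p => d.setdefault p.2 p.1)
        (PySem.Dict.empty : PySem.Dict Int Int)).getD x (tpl.length : Int)
      = rankK tpl x := by
  rw [PySem.Dict.getD_eq_get?_getD, setdefault_fold_get? tpl 0 PySem.Dict.empty x]
  rw [PySem.Dict.get?_empty]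
  unfold rankK
  cases hq : PySem.List.index? tpl x <;> simp

-- If x never matches the template, the emitted part ignores a trailing x.
theorem ins_nomatch (tpl : List Int) :
    ∀ (o p : List Int) (x : Int), x ∉ tpl →
      (tpl.foldl bStep (o, p ++ [x])).1 = (tpl.foldl bStep (o, p)).1 := by
  induction tpl with
  | nil => intro o p x hx; rfl
  | cons e tl ih =>
      intro o p x hx
      have hxe : (x == e) = false := by
        simp only [beq_eq_false_iff_ne, ne_eq]
        intro h; exact hx (by simp [h])
      have h1 : (p ++ [x]).filter (fun z => z == e) = p.filter (fun z => z == e) := by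
        simp [List.filter_append, hxe]
      have h2 : (p ++ [x]).filter (fun z => z != e) = p.filter (fun z => z != e) ++ [x] := by
        simp [List.filter_append, bne, hxe]
      simp only [List.foldl_cons, bStep, h1, h2]
      exact ih _ _ x (fun h => hx (by simp [h]))

-- Inserting a template-matched x by rank lands exactly at the end of x's group.
theorem ins_match (K : Int → Int) :
    ∀ (tpl : List Int) (o p : List Int) (x : Int) (c : Int),
      x ∈ tpl →
      (∀ z ∈ p, z ∉ tpl → K x < K z) →
      (∀ z ∈ p, z ∈ tpl → K z = c + rankK tpl z) →
      K x = c + rankK tpl x →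
      (∀ y ∈ o, ¬ K x < K y) →
      PySem.List.insertBy (fun a b => decide (K a < K b)) x
          ((tpl.foldl bStep (o, p)).1 ++ p.filter (fun z => !tpl.contains z))
        = (tpl.foldl bStep (o, p ++ [x])).1 ++ p.filter (fun z => !tpl.contains z) := by
  intro tpl
  induction tpl with
  | nil => intro o p x c hx; exact absurd hx (by simp)
  | cons e tl ih =>
      intro o p x c hx hfar hp hxrank ho
      by_cases hxe : x = e
      · subst hxe
        have hq : (p ++ [x]).filter (fun z => z != x) = p.filter (fun z => z != x) := by
          simp [List.filter_append]
        have hg : (p ++ [x]).filter (fun z => z == x) = p.filter (fun z => z == x) ++ [x] := by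
          simp [List.filter_append]
        simp only [List.foldl_cons, bStep, hg, hq]
        rw [fst_foldl_bStep_append tl (o ++ p.filter (fun z => z == x)),
            fst_foldl_bStep_append tl (o ++ (p.filter (fun z => z == x) ++ [x]))]
        set F := (tl.foldl bStep ([], p.filter (fun z => z != x))).1 with hF
        have hKx : K x = c := by
          rw [hxrank, rankK_cons_self]; ring
        -- pass o and the x-group
        rw [show o ++ p.filter (fun z => z == x) ++ F ++ p.filter (fun z => !(x :: tl).contains z)
              = (o ++ p.filter (fun z => z == x)) ++ (F ++ p.filter (fun z => !(x :: tl).contains z))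
            from by simp]
        rw [insertBy_append_not _ _ _ _ ?hpass]
        case hpass =>
          intro y hy
          rcases List.mem_append.mp hy with hy | hy
          · simpa using ho y hy
          · have hyx : y = x := by simpa using List.of_mem_filter hy
            subst hyx; simp
        rw [insertBy_all_before _ _ _ ?hafter]
        case hafter =>
          intro z hz
          rcases List.mem_append.mp hz with hz | hz
          · obtain ⟨hz1, hz2⟩ := mem_fst_foldl_bStep tl _ z hz
            have hzp : z ∈ p := List.mem_of_mem_filter hz1
            have hzne : z ≠ x := by simpa using (List.of_mem_filter hz1)
            have hzk := hp z hzp (by simp [hz2])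
            rw [rankK_cons_of_ne_mem x z tl (fun h => hzne h.symm) hz2] at hzk
            have h0 := rankK_nonneg tl z
            simp only [decide_eq_true_eq]
            omega
          · have hzp : z ∈ p := List.mem_of_mem_filter hz
            have hznot : z ∉ x :: tl := by
              have := List.of_mem_filter hz
              simpa using this
            simpa using hfar z hzp hznot
        simp
      · have hx' : x ∈ tl := by
          rcases List.mem_cons.mp hx with h | h
          · exact absurd h hxe
          · exact h
        have hg : (p ++ [x]).filter (fun z => z == e) = p.filter (fun z => z == e) := by
          simp [List.filter_append, hxe]
        have hq : (p ++ [x]).filter (fun z => z != e) = p.filter (fun z => z != e) ++ [x] := by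
          simp [List.filter_append, hxe]
        simp only [List.foldl_cons, bStep, hg, hq]
        have hresfilter : p.filter (fun z => !(e :: tl).contains z)
            = (p.filter (fun z => z != e)).filter (fun z => !tl.contains z) := by
          rw [List.filter_filter]
          refine List.filter_congr ?_
          intro z _
          by_cases hze : z = e <;> by_cases hzt : tl.contains z = true <;>
            simp [List.contains_cons, hze, hzt]
        rw [hresfilter]
        refine ih (o ++ p.filter (fun z => z == e)) (p.filter (fun z => z != e)) x (c + 1)
          hx' ?_ ?_ ?_ ?_
        · intro z hz hznot
          refine hfar z (List.mem_of_mem_filter hz) ?_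
          intro hmem
          rcases List.mem_cons.mp hmem with h | h
          · have := List.of_mem_filter hz; simp [h] at this
          · exact hznot h
        · intro z hz hzt
          have hzne : z ≠ e := by simpa using (List.of_mem_filter hz)
          have := hp z (List.mem_of_mem_filter hz) (by simp [hzt])
          rw [rankK_cons_of_ne_mem e z tl (fun h => hzne h.symm) hzt] at this
          omega
        · rw [hxrank, rankK_cons_of_ne_mem e x tl (fun h => hxe h.symm) hx']
          ring
        · intro y hy
          rcases List.mem_append.mp hy with hy | hy
          · exact ho y hy
          · have hye : y = e := by simpa using (List.of_mem_filter hy)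
            have hyk := hp y (List.mem_of_mem_filter hy) (by simp [hye])
            rw [hye] at hyk ⊢
            rw [rankK_cons_self] at hyk
            rw [hxrank, rankK_cons_of_ne_mem e x tl (fun h => hxe h.symm) hx']
            have h0 := rankK_nonneg tl x
            omega

-- The stable sort keyed on first-occurrence rank is: groups in template order,
-- then the unmatched elements in source order.
theorem stable_sort_eq (tpl : List Int) (s : List Int) :
    PySem.List.sorted s (fun x => rankK tpl x) false
      = (tpl.foldl bStep ([], s)).1 ++ s.filter (fun z => !tpl.contains z) := by
  rw [PySem.List.sorted_eq_foldl_insertBy]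
  induction s using List.reverseRecOn with
  | nil => simp [fst_foldl_bStep_nil]
  | append_singleton p x ih =>
      rw [List.foldl_append, List.foldl_cons, List.foldl_nil, ih]
      by_cases hx : x ∈ tpl
      · have hfil : (p ++ [x]).filter (fun z => !tpl.contains z)
            = p.filter (fun z => !tpl.contains z) := by
          simp only [List.filter_append, List.filter_cons, List.filter_nil]
          rw [List.contains_iff_mem.mpr hx]
          simp
        rw [hfil]
        refine ins_match (rankK tpl) tpl [] p x 0 ?_ ?_ ?_ ?_ ?_
        · exact hx
        · intro z hz hznot
          rw [rankK_of_not_mem tpl z hznot]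
          exact rankK_lt_of_mem tpl x hx
        · intro z hz hzt; ring
        · ring
        · simp
      · have hcontains : tpl.contains x = false := by
          cases h : tpl.contains x
          · rfl
          · exact absurd (List.contains_iff_mem.mp h) hx
        have hfil : (p ++ [x]).filter (fun z => !tpl.contains z)
            = p.filter (fun z => !tpl.contains z) ++ [x] := by
          simp only [List.filter_append, List.filter_cons, List.filter_nil]
          rw [hcontains]
          simp
        rw [hfil, ins_nomatch tpl [] p x hx]
        rw [PySem.List.insertBy_of_forall_not_before _ _ _ ?hnone]
        case hnone =>
          intro y hy
          have hyle : rankK tpl y ≤ (tpl.length : Int) := rankK_le tpl y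
          have hxeq : rankK tpl x = (tpl.length : Int) := rankK_of_not_mem tpl x hx
          simp only [decide_eq_false_iff_not, not_lt]
          omega
        simp

-- filtering commutes with the value sort (both sides are sorted(t.filter q)).
theorem sorted_filter_comm (q : Int → Bool) (t : List Int) :
    (PySem.List.sorted t (fun x => x) false).filter q
      = PySem.List.sorted (t.filter q) (fun x => x) false := by
  refine (PySem.List.sorted_id_eq_of_perm_of_pairwise (t.filter q)
    ((PySem.List.sorted t (fun x => x) false).filter q)
    ((PySem.List.sorted_perm t (fun x => x) false).filter q) ?_).symm
  exact List.Pairwise.sublist List.filter_sublist (PySem.List.sorted_pairwise t (fun x => x))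

-- ===== VERDICT helper: the whole theorem =====
theorem template_sort_spec : Claim_equal_template_sort := by
  unfold Claim_equal_template_sort
  intro data tmpl _
  unfold Spec_template_sort
  have hkey : (fun x => ((PySem.List.enumerate tmpl).foldl (fun d p => d.setdefault p.2 p.1)
      (PySem.Dict.empty : PySem.Dict Int Int)).getD x (tmpl.length : Int))
      = fun x => rankK tmpl x := by
    funext x; exact rank_getD tmpl x
  cases data with
  | nil =>
      simp only [template_sort, template_sort_alt]
      rw [foldl_pass1_nil]
      rw [show PySem.List.pyRange ((([] : List Int), (1 : Int)).2)
          (((([] : List Int), (1 : Int)).1.length : Nat) : Int) 1 = [] from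
        PySem.List.pyRange_one_eq_nil (by simp)]
      rw [show PySem.List.slice ([] : List Int) none (some 1) = ([] : List Int) from by
            rw [PySem.List.slice_to _ (by norm_num)]; rfl]
      rw [show PySem.List.slice ([] : List Int) (some 1) none = ([] : List Int) from by
            rw [PySem.List.slice_from_one]; rfl]
      rw [show PySem.List.sorted ([] : List Int) (fun x => x) false = ([] : List Int) from rfl]
      rw [hkey, stable_sort_eq tmpl []]
      rw [fst_foldl_bStep_nil]
      simp
  | cons h t =>
      simp only [template_sort, template_sort_alt]
      have h1 := tsPhase1 tmpl [h] t
      simp only [List.singleton_append, List.length_singleton, Nat.cast_one] at h1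
      rw [h1]
      have h2 := tsPhase2 (tmpl.foldl bStep ([h], t)).2 (tmpl.foldl bStep ([h], t)).1 []
      simp only [List.length_nil, Nat.add_zero, List.append_nil, List.nil_append] at h2
      have hslice1 : PySem.List.slice (h :: t) none (some 1) = [h] := by
        rw [PySem.List.slice_to _ (by norm_num)]
        rfl
      have hslice2 : PySem.List.slice (h :: t) (some 1) none = t := by
        rw [PySem.List.slice_from_one]
        rfl
      rw [hslice1, hslice2, hkey]
      rw [stable_sort_eq tmpl (PySem.List.sorted t (fun x => x) false)]
      rw [fst_foldl_bStep_perm tmpl [] (PySem.List.sorted t (fun x => x) false) t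
        (PySem.List.sorted_perm t (fun x => x) false)]
      rw [sorted_filter_comm]
      show (PySem.List.pyRange ((tmpl.foldl bStep ([h], t)).1.length : Int)
          ((((tmpl.foldl bStep ([h], t)).1 ++ (tmpl.foldl bStep ([h], t)).2).length : Nat) : Int) 1).foldl
          (tsPass2Step ((tmpl.foldl bStep ([h], t)).1.length : Int))
          ((tmpl.foldl bStep ([h], t)).1 ++ (tmpl.foldl bStep ([h], t)).2) = _
      have hlen : ((((tmpl.foldl bStep ([h], t)).1 ++ (tmpl.foldl bStep ([h], t)).2).length : Nat) : Int)
          = (((tmpl.foldl bStep ([h], t)).1.length + (tmpl.foldl bStep ([h], t)).2.length : Nat) : Int) := by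
        simp
      rw [hlen, h2, insFold_eq_sorted]
      rw [snd_foldl_bStep tmpl [h] t, foldl_filter_ne tmpl t]
      rw [fst_foldl_bStep_append tmpl [h] t]
      simp
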